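-- pv_equiv track=rewrite | github.com/blanec12/advent-of-code | 2015/03/solution.py | deliver_presents
-- ===== SOURCE A (Python) =====
-- coordinates = {
--     "^": (0, 1),
--     ">": (1, 0),
--     "v": (0, -1),
--     "<": (-1, 0),
-- }
--
-- def deliver_presents(directions, num_people=1):
--     people = [[0, 0] for _ in range(num_people)]
--     visited = set()
--     visited.add((0, 0))
--
--     for i, direction in enumerate(directions):
--         person = people[i % num_people]
--         person[0] += coordinates[direction][0]
--         person[1] += coordinates[direction][1]
--         visited.add(tuple(person))
--
--     return visited
-- ===== SOURCE B (Python) =====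
-- coordinates = {
--     "^": (0, 1),
--     ">": (1, 0),
--     "v": (0, -1),
--     "<": (-1, 0),
-- }
--
-- def deliver_presents(directions, num_people=1):
--     # Phase 1: partition the direction steps among the people.
--     groups = [[] for _ in range(num_people)]
--     for i, direction in enumerate(directions):
--         groups[i % num_people].append((i, direction))
--     # Phase 2: each person walks its own steps, recording each reached
--     # position in a step-indexed trail; the visited set is built once at the end.
--     trail = [(0, 0)] * (len(directions) + 1)
--     for group in groups:
--         x = y = 0
--         for i, direction in group:
--             dx, dy = coordinates[direction]
--             x += dx
--             y += dy
--             trail[i + 1] = (x, y)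
--     return set(trail)
-- ===== Notes on version B (the rewrite author's own statement) =====
-- stated objective: alternative
-- what changed: Instead of one interleaved pass that mutates a per-person position array and inserts into the set at every step, B first partitions the indexed direction steps into one list per person via i % num_people and then lets each person walk its own steps, writing each reached position into a step-indexed trail list from which the visited set is built once at the end.
import Mathlib
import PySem

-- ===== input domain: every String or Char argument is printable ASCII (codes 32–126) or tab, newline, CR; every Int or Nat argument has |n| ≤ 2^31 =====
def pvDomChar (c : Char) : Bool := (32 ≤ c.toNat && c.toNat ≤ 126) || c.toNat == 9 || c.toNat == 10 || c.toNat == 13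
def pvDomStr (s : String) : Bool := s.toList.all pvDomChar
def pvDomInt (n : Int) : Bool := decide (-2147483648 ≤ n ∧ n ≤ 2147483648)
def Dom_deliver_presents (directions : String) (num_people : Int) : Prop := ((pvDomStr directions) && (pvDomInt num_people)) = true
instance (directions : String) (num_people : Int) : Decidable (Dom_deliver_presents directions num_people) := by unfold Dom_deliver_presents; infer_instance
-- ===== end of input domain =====

-- B replaces A's interleaved one-pass simulation by a two-phase scheme: partition the
-- steps among the people first, then let each person walk its own steps into a
-- step-indexed trail from which the visited set is built once (objective: alternative).

-- ===== PORT A =====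
-- module-level 'coordinates' dict, shared by both Pythons
def pvCoords : PySem.Dict Char (Int × Int) :=
  PySem.Dict.ofList [('^', (0, 1)), ('>', (1, 0)), ('v', (0, -1)), ('<', (-1, 0))]

-- coordinates[c]; Python raises KeyError on other characters, excluded by Pre_
def pvCoordGet (c : Char) : Int × Int := (PySem.Dict.get? pvCoords c).getD (0, 0)

-- loop body of A: i % num_people (ZeroDivisionError → getD, excluded by Pre_),
-- people[i % num_people] (IndexError → getD, excluded by Pre_), update person, add to set
def pvStepA (num_people : Int) (st : List (Int × Int) × List (Int × Int)) (p : Int × Char) :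
    List (Int × Int) × List (Int × Int) :=
  let j := (PySem.Int.mod? p.1 num_people).getD 0
  let person := (PySem.List.pyGet? st.1 j).getD (0, 0)
  let d := pvCoordGet p.2
  let person' := (person.1 + d.1, person.2 + d.2)
  (PySem.List.pySetD st.1 j person', PySem.Set.add st.2 person')

def deliver_presents (directions : String) (num_people : Int) : List (Int × Int) :=
  let people := (PySem.List.pyRange 0 num_people 1).map (fun _ => ((0 : Int), (0 : Int)))
  let visited := PySem.Set.add PySem.Set.empty ((0 : Int), (0 : Int))
  ((PySem.List.enumerate directions.toList 0).foldl (pvStepA num_people) (people, visited)).2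

-- ===== PORT B =====
-- phase-1 loop body of B: groups[i % num_people].append((i, direction))
-- (i % num_people and the list indexing raise in Python exactly where A's do; → getD under Pre_)
def pvGroupStep (num_people : Int) (gs : List (List (Int × Char))) (p : Int × Char) :
    List (List (Int × Char)) :=
  let j := (PySem.Int.mod? p.1 num_people).getD 0
  let g := (PySem.List.pyGet? gs j).getD []
  PySem.List.pySetD gs j (g ++ [p])

-- phase-2 inner loop body of B: move by coordinates[direction], write trail[i + 1]
def pvStepB (st : (Int × Int) × List (Int × Int)) (p : Int × Char) :
    (Int × Int) × List (Int × Int) :=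
  let d := pvCoordGet p.2
  let x := st.1.1 + d.1
  let y := st.1.2 + d.2
  ((x, y), PySem.List.pySetD st.2 (p.1 + 1) (x, y))

def deliver_presents_alt (directions : String) (num_people : Int) : List (Int × Int) :=
  let cs := directions.toList
  -- groups = [[] for _ in range(num_people)], then the phase-1 partition loop
  let groups0 := (PySem.List.pyRange 0 num_people 1).map (fun _ => ([] : List (Int × Char)))
  let groups := (PySem.List.enumerate cs 0).foldl (pvGroupStep num_people) groups0
  -- trail = [(0, 0)] * (len(directions) + 1), then one walk per group
  let trail := groups.foldl
    (fun tr g => (g.foldl pvStepB (((0 : Int), (0 : Int)), tr)).2)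
    (PySem.List.pyRepeat [((0 : Int), (0 : Int))] (PySem.Str.len directions + 1))
  PySem.Set.ofList trail

-- ===== PRECONDITION & SPEC =====
-- Pre_ excludes exactly the inputs where Python A raises: a character that is not one of
-- the four arrow keys of the coordinates dict (KeyError) and nonempty directions with
-- num_people ≤ 0 (ZeroDivisionError/IndexError).
def Pre_deliver_presents (directions : String) (num_people : Int) : Prop :=
  (directions.toList.all (fun c => c == '^' || c == '>' || c == 'v' || c == '<') = true) ∧
  (directions.toList = [] ∨ 1 ≤ num_people)
instance (directions : String) (num_people : Int) : Decidable (Pre_deliver_presents directions num_people) := by unfold Pre_deliver_presents; infer_instance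

def pvWitness_deliver_presents : String × Int := ("^", 1)

def Spec_deliver_presents (directions : String) (num_people : Int) (out : List (Int × Int)) : Prop := out = deliver_presents_alt directions num_people
instance (directions : String) (num_people : Int) (out : List (Int × Int)) : Decidable (Spec_deliver_presents directions num_people out) := by unfold Spec_deliver_presents; infer_instance

-- ===== CLAIM (what is proved, stated in full; the proofs are below) =====
def Claim_equal_deliver_presents : Prop := ∀ (directions : String) (num_people : Int), Dom_deliver_presents directions num_people → Pre_deliver_presents directions num_people → Spec_deliver_presents directions num_people (deliver_presents directions num_people)

-- ===== LEMMAS AND PROOFS =====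

-- componentwise pair addition, the common step of both ports
def pvAdd (p q : Int × Int) : Int × Int := (p.1 + q.1, p.2 + q.2)

-- pvAcc cs N j m = position of person j after all steps with index < m (indices ≡ j mod N)
def pvAcc (cs : List Char) (N j : Nat) : Nat → Int × Int
  | 0 => (0, 0)
  | m + 1 => if m % N = j then pvAdd (pvAcc cs N j m) (pvCoordGet (cs.getD m ' ')) else pvAcc cs N j m

-- position reached by step i (the value A adds to the set at step i, B writes to trail[i+1])
def pvPos (cs : List Char) (N i : Nat) : Int × Int := pvAcc cs N (i % N) (i + 1)

-- person j's share of the first m steps, as B's phase 1 builds it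
def pvGrp (cs : List Char) (N j m : Nat) : List (Int × Char) :=
  ((List.range m).filter (fun i => i % N == j)).map (fun (i : Nat) => (((i : Int), cs.getD i ' ') : Int × Char))

lemma pvGrp_succ (cs : List Char) (N j m : Nat) :
    pvGrp cs N j (m + 1) =
      pvGrp cs N j m ++ (if m % N = j then [((m : Int), cs.getD m ' ')] else []) := by
  unfold pvGrp
  rw [List.range_succ, List.filter_append, List.map_append]
  by_cases h : m % N = j
  · simp [h]
  · simp [h]

-- A's loop: from step m on, with people j holding pvAcc j m, the visited set accumulates pvPos
lemma pvA_loop (cs : List Char) (N : Nat) (hN : 0 < N) :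
    ∀ (tail : List Char) (m : Nat) (ppl vis : List (Int × Int)),
      cs.drop m = tail → ppl.length = N →
      (∀ j, j < N → ppl[j]? = some (pvAcc cs N j m)) →
      ((PySem.List.enumerate tail (m : Int)).foldl (pvStepA (N : Int)) (ppl, vis)).2 =
        List.foldl (fun v i => PySem.Set.add v (pvPos cs N i)) vis
          (List.range' m (cs.length - m)) := by
  intro tail
  induction tail with
  | nil =>
    intro m ppl vis hdrop _ _
    have hlen : cs.length ≤ m := by
      have := congrArg List.length hdrop
      simp at this
      omega
    simp [PySem.List.enumerate_nil, Nat.sub_eq_zero_of_le hlen]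
  | cons c tail' ih =>
    intro m ppl vis hdrop hlen hppl
    have hm : m < cs.length := by
      have := congrArg List.length hdrop
      simp at this
      omega
    have hc : cs[m]? = some c := by
      have h0 : (cs.drop m)[0]? = some c := by rw [hdrop]; rfl
      simpa using h0
    have hdrop' : cs.drop (m + 1) = tail' := by
      rw [← List.tail_drop, hdrop]
      rfl
    have hNne : ((N : Nat) : Int) ≠ 0 := by
      exact_mod_cast Nat.pos_iff_ne_zero.1 hN
    have hmlt : m % N < N := Nat.mod_lt _ hN
    have hmod : PySem.Int.mod? ((m : Nat) : Int) ((N : Nat) : Int) = some (((m % N : Nat)) : Int) := by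
      have h1 := PySem.Int.mod_natCast m N
      simp only [PySem.Int.mod?, if_neg hNne]
      rw [show ((m : Int).fmod (N : Int)) = PySem.Int.mod (m : Int) (N : Int) from rfl, h1]
    have hstep : pvStepA ((N : Nat) : Int) (ppl, vis) (((m : Nat) : Int), c) =
        (ppl.set (m % N) (pvAdd (pvAcc cs N (m % N) m) (pvCoordGet c)),
         PySem.Set.add vis (pvAdd (pvAcc cs N (m % N) m) (pvCoordGet c))) := by
      have hget : (PySem.List.pyGet? ppl ((m % N : Nat) : Int)).getD (0, 0) = pvAcc cs N (m % N) m := by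
        rw [PySem.List.pyGet?_natCast, hppl _ hmlt]
        rfl
      simp only [pvStepA, hmod, Option.getD_some, hget, PySem.List.pySetD_natCast]
      rfl
    have hP : pvAdd (pvAcc cs N (m % N) m) (pvCoordGet c) = pvPos cs N m := by
      simp [pvPos, pvAcc, List.getD_eq_getElem?_getD, hc]
    have hrange : List.range' m (cs.length - m) = m :: List.range' (m + 1) (cs.length - (m + 1)) := by
      have he : cs.length - m = (cs.length - (m + 1)) + 1 := by omega
      rw [he, List.range'_succ]
    rw [PySem.List.enumerate_cons, List.foldl_cons, hstep, hrange, List.foldl_cons, ← hP]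
    have hcast : ((m : Nat) : Int) + 1 = (((m + 1 : Nat)) : Int) := by push_cast; ring
    rw [hcast]
    apply ih (m + 1)
    · exact hdrop'
    · rw [List.length_set]; exact hlen
    · intro j hj
      by_cases he : m % N = j
      · subst he
        rw [List.getElem?_set, if_pos rfl, if_pos (by omega)]
        simp [pvAcc, List.getD_eq_getElem?_getD, hc]
      · rw [List.getElem?_set, if_neg he]
        rw [hppl j hj]
        simp [pvAcc, he]

-- B's phase-1 loop: from step m on, with groups j holding pvGrp j m, it completes the partition
lemma pvPart (cs : List Char) (N : Nat) (hN : 0 < N) :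
    ∀ (tail : List Char) (m : Nat) (gs : List (List (Int × Char))),
      cs.drop m = tail → m ≤ cs.length → gs.length = N →
      (∀ j, j < N → gs[j]? = some (pvGrp cs N j m)) →
      ((PySem.List.enumerate tail (m : Int)).foldl (pvGroupStep (N : Int)) gs).length = N ∧
      ∀ j, j < N →
        ((PySem.List.enumerate tail (m : Int)).foldl (pvGroupStep (N : Int)) gs)[j]? =
          some (pvGrp cs N j cs.length) := by
  intro tail
  induction tail with
  | nil =>
    intro m gs hdrop hmle hlen hgs
    have hLm : cs.length ≤ m := by
      have := congrArg List.length hdrop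
      simp at this
      omega
    obtain rfl : m = cs.length := by omega
    refine ⟨by simpa [PySem.List.enumerate_nil] using hlen, ?_⟩
    intro j hj
    simp only [PySem.List.enumerate_nil, List.foldl_nil]
    exact hgs j hj
  | cons c tail' ih =>
    intro m gs hdrop hmle hlen hgs
    have hm : m < cs.length := by
      have := congrArg List.length hdrop
      simp at this
      omega
    have hc : cs[m]? = some c := by
      have h0 : (cs.drop m)[0]? = some c := by rw [hdrop]; rfl
      simpa using h0
    have hdrop' : cs.drop (m + 1) = tail' := by
      rw [← List.tail_drop, hdrop]
      rfl
    have hNne : ((N : Nat) : Int) ≠ 0 := by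
      exact_mod_cast Nat.pos_iff_ne_zero.1 hN
    have hmlt : m % N < N := Nat.mod_lt _ hN
    have hmod : PySem.Int.mod? ((m : Nat) : Int) ((N : Nat) : Int) = some (((m % N : Nat)) : Int) := by
      have h1 := PySem.Int.mod_natCast m N
      simp only [PySem.Int.mod?, if_neg hNne]
      rw [show ((m : Int).fmod (N : Int)) = PySem.Int.mod (m : Int) (N : Int) from rfl, h1]
    have hstep : pvGroupStep ((N : Nat) : Int) gs (((m : Nat) : Int), c) =
        gs.set (m % N) (pvGrp cs N (m % N) m ++ [((m : Int), c)]) := by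
      have hget : (PySem.List.pyGet? gs ((m % N : Nat) : Int)).getD [] = pvGrp cs N (m % N) m := by
        rw [PySem.List.pyGet?_natCast, hgs _ hmlt]
        rfl
      simp only [pvGroupStep, hmod, Option.getD_some, hget, PySem.List.pySetD_natCast]
    rw [PySem.List.enumerate_cons, List.foldl_cons, hstep]
    have hcast : ((m : Nat) : Int) + 1 = (((m + 1 : Nat)) : Int) := by push_cast; ring
    rw [hcast]
    apply ih (m + 1)
    · exact hdrop'
    · omega
    · rw [List.length_set]; exact hlen
    · intro j hj
      rw [pvGrp_succ]
      by_cases he : m % N = j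
      · subst he
        rw [List.getElem?_set, if_pos rfl, if_pos (by omega), if_pos rfl]
        have hcm : cs.getD m ' ' = c := by
          simp [List.getD_eq_getElem?_getD, hc]
        rw [hcm]
      · rw [List.getElem?_set, if_neg he, hgs j hj, if_neg he]
        simp
lemma pvB_walk (cs : List Char) (N : Nat) (k : Nat) :
    ∀ (m : Nat) (tr : List (Int × Int)), m ≤ cs.length → tr.length = cs.length + 1 →
      ((pvGrp cs N k m).foldl pvStepB (((0 : Int), (0 : Int)), tr)).1 = pvAcc cs N k m ∧
      (((pvGrp cs N k m).foldl pvStepB (((0 : Int), (0 : Int)), tr)).2).length = cs.length + 1 ∧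
      ∀ t : Nat,
        (((pvGrp cs N k m).foldl pvStepB (((0 : Int), (0 : Int)), tr)).2)[t]? =
          if 1 ≤ t ∧ t ≤ m ∧ (t - 1) % N = k then some (pvPos cs N (t - 1)) else tr[t]? := by
  intro m
  induction m with
  | zero =>
    intro tr _ hlen
    refine ⟨rfl, by simpa [pvGrp] using hlen, ?_⟩
    intro t
    simp only [pvGrp, List.range_zero, List.filter_nil, List.map_nil, List.foldl_nil]
    rw [if_neg (by omega)]
  | succ m ih =>
    intro tr hm hlen
    obtain ⟨ih1, ih2, ih3⟩ := ih tr (by omega) hlen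
    rw [pvGrp_succ]
    by_cases he : m % N = k
    · rw [if_pos he, List.foldl_append, List.foldl_cons, List.foldl_nil]
      set st := (pvGrp cs N k m).foldl pvStepB (((0 : Int), (0 : Int)), tr) with hst
      have hcast : ((m : Nat) : Int) + 1 = (((m + 1 : Nat)) : Int) := by push_cast; ring
      have hstep : pvStepB st (((m : Int)), cs.getD m ' ') =
          (pvAcc cs N k (m + 1), st.2.set (m + 1) (pvAcc cs N k (m + 1))) := by
        have hval : pvAdd st.1 (pvCoordGet (cs.getD m ' ')) = pvAcc cs N k (m + 1) := by
          rw [ih1]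
          simp [pvAcc, he]
        simp only [pvStepB, hcast, PySem.List.pySetD_natCast]
        rw [show (st.1.1 + (pvCoordGet (cs.getD m ' ')).1, st.1.2 + (pvCoordGet (cs.getD m ' ')).2)
            = pvAdd st.1 (pvCoordGet (cs.getD m ' ')) from rfl, hval]
      rw [hstep]
      have hpos : pvAcc cs N k (m + 1) = pvPos cs N m := by
        rw [pvPos, he]
      refine ⟨rfl, by rw [List.length_set]; exact ih2, ?_⟩
      intro t
      rw [List.getElem?_set]
      by_cases ht : t = m + 1
      · subst ht
        rw [if_pos rfl, if_pos (by omega), if_pos (by refine ⟨by omega, le_rfl, ?_⟩; simpa using he)]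
        rw [hpos]
        simp
      · rw [if_neg (by omega : ¬ m + 1 = t), ih3 t]
        by_cases hcond : 1 ≤ t ∧ t ≤ m ∧ (t - 1) % N = k
        · rw [if_pos hcond, if_pos ⟨hcond.1, by omega, hcond.2.2⟩]
        · rw [if_neg hcond, if_neg (by
            rintro ⟨u1, u2, u3⟩
            by_cases ht2 : t = m + 1
            · exact ht ht2
            · exact hcond ⟨u1, by omega, u3⟩)]
    · rw [if_neg he, List.append_nil]
      have hacc : pvAcc cs N k (m + 1) = pvAcc cs N k m := by
        simp [pvAcc, he]
      refine ⟨by rw [ih1, hacc], ih2, ?_⟩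
      intro t
      rw [ih3 t]
      by_cases hcond : 1 ≤ t ∧ t ≤ m ∧ (t - 1) % N = k
      · rw [if_pos hcond, if_pos ⟨hcond.1, by omega, hcond.2.2⟩]
      · rw [if_neg hcond, if_neg (by
          rintro ⟨u1, u2, u3⟩
          by_cases ht2 : t = m + 1
          · exact he (by simpa [ht2] using u3)
          · exact hcond ⟨u1, by omega, u3⟩)]

-- B's phase-2 fold over the first K groups
lemma pvB_outer (cs : List Char) (N : Nat) :
    ∀ K, K ≤ N →
      ((List.range K).foldl
          (fun tr (k : Nat) =>
            ((pvGrp cs N k cs.length).foldl pvStepB (((0 : Int), (0 : Int)), tr)).2)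
          (List.replicate (cs.length + 1) ((0 : Int), (0 : Int)))).length = cs.length + 1 ∧
      ∀ t : Nat,
        ((List.range K).foldl
            (fun tr (k : Nat) =>
              ((pvGrp cs N k cs.length).foldl pvStepB (((0 : Int), (0 : Int)), tr)).2)
            (List.replicate (cs.length + 1) ((0 : Int), (0 : Int))))[t]? =
          if 1 ≤ t ∧ t ≤ cs.length ∧ (t - 1) % N < K then some (pvPos cs N (t - 1))
          else if t ≤ cs.length then some ((0 : Int), (0 : Int)) else none := by
  intro K
  induction K with
  | zero =>
    intro _
    refine ⟨by simp, ?_⟩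
    intro t
    simp only [List.range_zero, List.foldl_nil, List.getElem?_replicate]
    by_cases h : t ≤ cs.length
    · rw [if_pos (by omega : t < cs.length + 1), if_neg (by omega), if_pos h]
    · rw [if_neg (by omega : ¬ t < cs.length + 1), if_neg (by omega), if_neg h]
  | succ K ih =>
    intro hK
    obtain ⟨ihlen, ihget⟩ := ih (by omega)
    rw [List.range_succ, List.foldl_append, List.foldl_cons, List.foldl_nil]
    set trK := (List.range K).foldl
        (fun tr (k : Nat) =>
          ((pvGrp cs N k cs.length).foldl pvStepB (((0 : Int), (0 : Int)), tr)).2)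
        (List.replicate (cs.length + 1) ((0 : Int), (0 : Int))) with htrK
    obtain ⟨_, hwlen, hwget⟩ :=
      pvB_walk cs N K cs.length trK le_rfl ihlen
    refine ⟨hwlen, ?_⟩
    intro t
    rw [hwget t, ihget t]
    by_cases hc1 : 1 ≤ t ∧ t ≤ cs.length ∧ (t - 1) % N = K
    · rw [if_pos hc1, if_pos ⟨hc1.1, hc1.2.1, by omega⟩]
    · rw [if_neg hc1]
      by_cases hc2 : 1 ≤ t ∧ t ≤ cs.length ∧ (t - 1) % N < K
      · rw [if_pos hc2, if_pos ⟨hc2.1, hc2.2.1, by omega⟩]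
      · have h3 : ¬ (1 ≤ t ∧ t ≤ cs.length ∧ (t - 1) % N < K + 1) := by
          intro hu
          have h4 : ¬ (t - 1) % N < K := fun hh => hc2 ⟨hu.1, hu.2.1, hh⟩
          have h5 : ¬ (t - 1) % N = K := fun hh => hc1 ⟨hu.1, hu.2.1, hh⟩
          omega
        rw [if_neg hc2, if_neg h3]

-- main case: num_people ≥ 1
lemma pvMain (directions : String) (num_people : Int) (h : 1 ≤ num_people) :
    deliver_presents directions num_people = deliver_presents_alt directions num_people := by
  have hN : 0 < num_people.toNat := by omega
  have hnp : num_people = ((num_people.toNat : Nat) : Int) := by omega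
  -- A side reduces to the canonical visited list
  have hA : deliver_presents directions num_people =
      PySem.Set.ofList (((0 : Int), (0 : Int)) ::
        (List.range directions.toList.length).map (pvPos directions.toList num_people.toNat)) := by
    simp only [deliver_presents]
    conv_lhs => rw [hnp]
    have hppl0 : (PySem.List.pyRange 0 ((num_people.toNat : Nat) : Int) 1).map
          (fun _ => ((0 : Int), (0 : Int))) =
        List.replicate num_people.toNat ((0 : Int), (0 : Int)) := by
      rw [PySem.List.pyRange_one, List.map_map]
      rw [show (((num_people.toNat : Nat) : Int) - 0).toNat = num_people.toNat from by omega]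
      simp [Function.comp_def]
    rw [hppl0]
    have hrep : ∀ j, j < num_people.toNat →
        (List.replicate num_people.toNat (((0 : Int), (0 : Int))))[j]? =
          some (pvAcc directions.toList num_people.toNat j 0) := by
      intro j hj
      rw [List.getElem?_replicate, if_pos hj]
      rfl
    have hstart := pvA_loop directions.toList num_people.toNat hN directions.toList 0
      (List.replicate num_people.toNat ((0 : Int), (0 : Int)))
      (PySem.Set.add PySem.Set.empty ((0 : Int), (0 : Int)))
      List.drop_zero List.length_replicate hrep
    simp only [Nat.sub_zero] at hstart
    rw [show ((0 : Nat) : Int) = (0 : Int) from rfl] at hstart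
    rw [hstart]
    rw [PySem.Set.ofList_eq_foldl, List.foldl_cons, List.foldl_map, List.range_eq_range']
    rfl
  -- B side reduces to the same canonical list
  have hB : deliver_presents_alt directions num_people =
      PySem.Set.ofList (((0 : Int), (0 : Int)) ::
        (List.range directions.toList.length).map (pvPos directions.toList num_people.toNat)) := by
    simp only [deliver_presents_alt]
    conv_lhs => rw [hnp]
    have hlen : PySem.Str.len directions = ((directions.toList.length : Nat) : Int) := rfl
    rw [hlen]
    have htrail0 : PySem.List.pyRepeat [((0 : Int), (0 : Int))]
          (((directions.toList.length : Nat) : Int) + 1) =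
        List.replicate (directions.toList.length + 1) ((0 : Int), (0 : Int)) := by
      rw [PySem.List.pyRepeat_singleton,
        show (((directions.toList.length : Nat) : Int) + 1).toNat =
          directions.toList.length + 1 from by omega]
    rw [htrail0]
    -- phase 1 computes the per-person groups
    have hg0 : (PySem.List.pyRange 0 ((num_people.toNat : Nat) : Int) 1).map
          (fun _ => ([] : List (Int × Char))) =
        List.replicate num_people.toNat ([] : List (Int × Char)) := by
      rw [PySem.List.pyRange_one, List.map_map]
      rw [show (((num_people.toNat : Nat) : Int) - 0).toNat = num_people.toNat from by omega]
      simp [Function.comp_def]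
    rw [hg0]
    have hg0' : ∀ j, j < num_people.toNat →
        (List.replicate num_people.toNat ([] : List (Int × Char)))[j]? =
          some (pvGrp directions.toList num_people.toNat j 0) := by
      intro j hj
      rw [List.getElem?_replicate, if_pos hj]
      simp [pvGrp]
    obtain ⟨hglen, hgget⟩ := pvPart directions.toList num_people.toNat hN directions.toList 0
      (List.replicate num_people.toNat ([] : List (Int × Char)))
      List.drop_zero (Nat.zero_le _) List.length_replicate hg0'
    rw [show ((0 : Nat) : Int) = (0 : Int) from rfl] at hglen hgget
    have hgroups : (PySem.List.enumerate directions.toList 0).foldl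
          (pvGroupStep ((num_people.toNat : Nat) : Int))
          (List.replicate num_people.toNat ([] : List (Int × Char))) =
        (List.range num_people.toNat).map
          (fun k => pvGrp directions.toList num_people.toNat k directions.toList.length) := by
      apply List.ext_getElem?
      intro j
      by_cases hj : j < num_people.toNat
      · rw [hgget j hj, List.getElem?_map, List.getElem?_range hj]
        rfl
      · rw [List.getElem?_eq_none_iff.2 (by omega : _ ≤ j),
          List.getElem?_eq_none_iff.2 (by simpa using (by omega : num_people.toNat ≤ j))]
    rw [hgroups, List.foldl_map]
    obtain ⟨_, hgetF⟩ :=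
      pvB_outer directions.toList num_people.toNat num_people.toNat le_rfl
    congr 1
    apply List.ext_getElem?
    intro t
    rw [hgetF t]
    match t with
    | 0 =>
      rw [if_neg (by omega), if_pos (by omega)]
      rfl
    | t + 1 =>
      rw [List.getElem?_cons_succ, List.getElem?_map]
      by_cases ht : t < directions.toList.length
      · rw [if_pos ⟨by omega, by omega, Nat.mod_lt _ hN⟩, List.getElem?_range ht]
        simp
      · have hnone : (List.range directions.toList.length)[t]? = none := by
          rw [List.getElem?_eq_none_iff]
          simpa using (by omega : directions.toList.length ≤ t)
        rw [if_neg (by omega), if_neg (by omega), hnone]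
        rfl
  rw [hA, hB]

-- ===== VERDICT (by name: the statement is the Claim_ definition above) =====
theorem deliver_presents_spec : Claim_equal_deliver_presents := by
  unfold Claim_equal_deliver_presents
  intro directions num_people _ hpre
  unfold Spec_deliver_presents
  rcases hpre.2 with hnil | hge
  · by_cases hge : 1 ≤ num_people
    · exact pvMain directions num_people hge
    · have hlen0 : PySem.Str.len directions = 0 := by simp [PySem.Str.len, hnil]
      simp only [deliver_presents, deliver_presents_alt, hnil, hlen0,
        PySem.List.pyRange_one_eq_nil (show num_people ≤ (0 : Int) from by omega),
        PySem.List.enumerate_nil, List.map_nil, List.foldl_nil]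
      rfl
  · exact pvMain directions num_people hge
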